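-- pv_equiv track=rewrite | github.com/joanna9810/workspace0228 | groupstudy1/return_cash.py | solution
-- ===== SOURCE A (Python) =====
-- def solution(price, money):
--     answer = 0
--     s = 0
--     for i in price:
--         s += i
--         if s > money:
--             return -1
--         else:
--             answer = money - s
--     return answer
-- ===== SOURCE B (Python) =====
-- def solution(price, money):
--     # Backward pass over the reversed list: maintain the suffix sum s and the
--     # maximum prefix-sum of the suffix via the recurrence m = max(x, x + m).
--     s = 0
--     m = None
--     for x in reversed(price):
--         m = x if m is None else max(x, x + m)
--         s = x + s
--     if m is None:
--         return 0
--     return -1 if m > money else money - s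
-- ===== Notes on version B (the rewrite author's own statement) =====
-- stated objective: alternative
-- what changed: Replaces A's forward scan with early exit by a backward pass over the reversed list that maintains the suffix sum and the maximum prefix-sum via the suffix recurrence m = max(x, x + m), deciding -1 only at the end.
import Mathlib
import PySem

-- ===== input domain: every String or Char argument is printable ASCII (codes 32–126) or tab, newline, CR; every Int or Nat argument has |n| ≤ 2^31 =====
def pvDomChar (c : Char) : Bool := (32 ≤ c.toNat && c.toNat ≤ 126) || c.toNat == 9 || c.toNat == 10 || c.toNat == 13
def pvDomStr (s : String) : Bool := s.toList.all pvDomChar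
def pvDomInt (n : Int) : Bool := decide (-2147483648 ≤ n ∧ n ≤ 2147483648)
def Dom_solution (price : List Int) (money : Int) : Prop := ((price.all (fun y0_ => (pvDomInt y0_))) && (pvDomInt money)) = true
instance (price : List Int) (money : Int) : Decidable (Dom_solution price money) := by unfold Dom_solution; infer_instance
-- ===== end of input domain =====

-- B replaces A's forward scan with early exit by a backward pass over the reversed list maintaining
-- the suffix sum and the maximum prefix-sum via the suffix recurrence m = max(x, x + m);
-- objective: alternative decomposition, same cost.

-- ===== PORT A =====
-- A's for-loop with early return, carrying the running sum s and answer.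
def solutionGo (money : Int) : List Int → Int → Int → Int
  | [], _, answer => answer
  | i :: rest, s, _ =>
    let s' := s + i
    if s' > money then -1 else solutionGo money rest s' (money - s')

def solution (price : List Int) (money : Int) : Int :=
  solutionGo money price 0 0

-- ===== PORT B =====
-- Source B's update `m = x if m is None else max(x, x + m)`
def mStepB (x : Int) (m : Option Int) : Int :=
  match m with
  | none => x
  | some m => max x (x + m)

-- Source B's loop body over reversed(price): state (s, m)
def stepB (st : Int × Option Int) (x : Int) : Int × Option Int :=
  (x + st.1, some (mStepB x st.2))

def solution_alt (price : List Int) (money : Int) : Int :=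
  let st := price.reverse.foldl stepB ((0 : Int), (none : Option Int))
  match st.2 with
  | none => 0
  | some m => if m > money then -1 else money - st.1

-- ===== PRECONDITION & SPEC =====
def Spec_solution (price : List Int) (money : Int) (out : Int) : Prop := out = solution_alt price money
instance (price : List Int) (money : Int) (out : Int) : Decidable (Spec_solution price money out) := by unfold Spec_solution; infer_instance

-- ===== CLAIM (what is proved, stated in full; the proofs are below) =====
def Claim_equal_solution : Prop := ∀ (price : List Int) (money : Int), Dom_solution price money → Spec_solution price money (solution price money)

-- ===== LEMMAS AND PROOFS =====

-- proof-only views of B's aggregate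
def sumF : List Int → Int
  | [] => 0
  | x :: t => x + sumF t

def mOptF : List Int → Option Int
  | [] => none
  | x :: t => some (mStepB x (mOptF t))

theorem foldr_stepB (l : List Int) :
    l.foldr (fun x st => stepB st x) ((0 : Int), (none : Option Int)) = (sumF l, mOptF l) := by
  induction l with
  | nil => rfl
  | cons x t ih =>
    simp only [List.foldr_cons, ih]
    rfl

theorem solutionGo_eq (money : Int) (rest : List Int) : ∀ (x s a : Int),
    solutionGo money (x :: rest) s a =
      if s + mStepB x (mOptF rest) > money then -1 else money - (s + (x + sumF rest)) := by
  induction rest with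
  | nil =>
    intro x s a
    have h : solutionGo money [x] s a = if s + x > money then -1 else money - (s + x) := rfl
    rw [h]
    simp only [mOptF, mStepB, sumF]
    split_ifs <;> omega
  | cons y t ih =>
    intro x s a
    have h : solutionGo money (x :: y :: t) s a
        = if s + x > money then -1 else solutionGo money (y :: t) (s + x) (money - (s + x)) := rfl
    rw [h, ih]
    simp only [mOptF, mStepB, sumF, max_def]
    split_ifs <;> omega

-- ===== VERDICT (by name: the statement is the Claim_ definition above) =====
theorem solution_spec : Claim_equal_solution := by
  intro price money _
  unfold Spec_solution solution solution_alt
  rw [List.foldl_reverse, foldr_stepB]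
  cases price with
  | nil => rfl
  | cons x rest =>
    simp only [mOptF]
    rw [solutionGo_eq money rest x 0 0]
    simp only [zero_add, sumF]
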